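-- pv_equiv track=rewrite | github.com/davidleon/Gaseous-Prime-Universe | verification/verify_adelic_scaling.py | generate_prime_gaps
-- ===== SOURCE A (Python) =====
-- def generate_prime_gaps(limit=5000):
--     """Generate prime gaps."""
--     def get_primes(n):
--         primes, is_p = [], [True]*(n+1)
--         for p in range(2, n+1):
--             if is_p[p]:
--                 primes.append(p)
--                 for i in range(p*p, n+1, p): is_p[i] = False
--         return primes
--     primes = get_primes(limit)
--     return [primes[i+1] - primes[i] for i in range(len(primes)-1)]
-- ===== SOURCE B (Python) =====
-- def generate_prime_gaps(limit=5000):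
--     """Generate prime gaps by square-root-bounded trial division per candidate
--     (no sieve, no shared boolean array)."""
--     def is_prime(p):
--         d = 2
--         while d * d <= p:
--             if p % d == 0:
--                 return False
--             d += 1
--         return True
--     primes = [p for p in range(2, limit + 1) if is_prime(p)]
--     return [q - p for p, q in zip(primes, primes[1:])]
-- ===== Notes on version B (the rewrite author's own statement) =====
-- stated objective: alternative
-- what changed: Replaces the Sieve of Eratosthenes (shared boolean array, marking multiples) by an independent square-root-bounded trial-division primality test per candidate, and the index-based differencing pass by zipping the primes list with its own tail.
import Mathlib
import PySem

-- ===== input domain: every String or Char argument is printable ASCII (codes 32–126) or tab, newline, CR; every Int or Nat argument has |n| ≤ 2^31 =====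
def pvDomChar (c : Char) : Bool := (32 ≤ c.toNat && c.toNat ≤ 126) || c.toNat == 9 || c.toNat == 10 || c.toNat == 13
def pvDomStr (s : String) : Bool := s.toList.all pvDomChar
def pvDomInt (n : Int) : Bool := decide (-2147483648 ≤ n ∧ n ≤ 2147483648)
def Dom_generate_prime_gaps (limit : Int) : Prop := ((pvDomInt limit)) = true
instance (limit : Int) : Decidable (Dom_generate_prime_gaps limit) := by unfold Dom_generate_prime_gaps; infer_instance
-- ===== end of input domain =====

-- B replaces the Sieve of Eratosthenes by independent trial-division primality tests
-- and the index-based differencing pass by zipping the primes list with its tail;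
-- objective: alternative algorithm (not faster).

-- ===== PORT A =====
-- loop body of A's sieve (the for-p loop in get_primes), kept as a named helper
def pvStepA (n : Int) (st : List Int × List Bool) (p : Int) : List Int × List Bool :=
  if PySem.List.pyGetD st.2 p false then
    (st.1 ++ [p],
     (PySem.List.pyRange (p * p) (n + 1) p).foldl (fun a i => PySem.List.pySetD a i false) st.2)
  else st

def generate_prime_gaps (limit : Int) : List Int :=
  let primes :=
    ((PySem.List.pyRange 2 (limit + 1) 1).foldl (pvStepA limit)
      ([], List.replicate (limit + 1).toNat true)).1
  (PySem.List.pyRange 0 ((primes.length : Int) - 1) 1).map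
    (fun i => PySem.List.pyGetD primes (i + 1) 0 - PySem.List.pyGetD primes i 0)

-- ===== PORT B =====
-- the while-loop of is_prime: 'while d*d <= p: if p % d == 0: return False; d += 1'
def pvTrial (p d : Int) : Bool :=
  if h : d * d ≤ p then
    if PySem.Int.mod p d = 0 then false else pvTrial p (d + 1)
  else true
termination_by (p + 2 - d).toNat
decreasing_by
  have h1 : 2 * d ≤ p + 1 := by nlinarith [mul_self_nonneg (d - 1)]
  have h2 : 0 ≤ p := le_trans (mul_self_nonneg d) h
  omega

-- 'is_prime(p)': start the trial divisor at 2
def pvIsPrimeB (p : Int) : Bool := pvTrial p 2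

def generate_prime_gaps_alt (limit : Int) : List Int :=
  let primes := (PySem.List.pyRange 2 (limit + 1) 1).filter pvIsPrimeB
  (primes.zip (PySem.List.slice primes (some 1) none)).map (fun pq => pq.2 - pq.1)

-- ===== PRECONDITION & SPEC =====
def Spec_generate_prime_gaps (limit : Int) (out : List Int) : Prop := out = generate_prime_gaps_alt limit
instance (limit : Int) (out : List Int) : Decidable (Spec_generate_prime_gaps limit out) := by unfold Spec_generate_prime_gaps; infer_instance

-- ===== CLAIM (what is proved, stated in full; the proofs are below) =====
def Claim_equal_generate_prime_gaps : Prop := ∀ (limit : Int), Dom_generate_prime_gaps limit → Spec_generate_prime_gaps limit (generate_prime_gaps limit)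

-- ===== LEMMAS AND PROOFS =====

-- consecutive differences of a list
def pvDiffs (l : List Int) : List Int := List.zipWith (fun x y => y - x) l l.tail

-- A's differencing comprehension computes pvDiffs
theorem pv_comprehension_eq_diffs (l : List Int) :
    (PySem.List.pyRange 0 ((l.length : Int) - 1) 1).map
      (fun i => PySem.List.pyGetD l (i + 1) 0 - PySem.List.pyGetD l i 0) = pvDiffs l := by
  cases l with
  | nil => simp [pvDiffs, PySem.List.pyRange_one_eq_nil]
  | cons x t =>
    have hlen : ((x :: t).length : Int) - 1 = (t.length : Int) := by
      push_cast [List.length_cons]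
      ring
    rw [hlen]
    apply List.ext_getElem
    · simp [PySem.List.length_pyRange_one, pvDiffs]
    · intro k h1 h2
      have hk : k < t.length := by
        simpa [PySem.List.length_pyRange_one] using h1
      have hrange : (PySem.List.pyRange 0 (t.length : Int) 1)[k]'(by
          simpa [PySem.List.length_pyRange_one] using h1) = (k : Int) := by
        rw [PySem.List.getElem_pyRange_one]; ring
      simp only [List.getElem_map, hrange]
      have h1cast : (k : Int) + 1 = ((k + 1 : Nat) : Int) := by push_cast; ring
      rw [h1cast, PySem.List.pyGetD_natCast, PySem.List.pyGetD_natCast]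
      have hgk : (x :: t).getD k 0 = (x :: t)[k]'(by simpa using Nat.lt_succ_of_lt hk) := by
        rw [List.getD_eq_getElem]
      have hgk1 : (x :: t).getD (k + 1) 0 = (x :: t)[k + 1]'(by simpa using hk) := by
        rw [List.getD_eq_getElem]
      rw [hgk, hgk1]
      simp [pvDiffs]

-- B's zip-with-tail comprehension computes pvDiffs
theorem pv_zip_eq_diffs (l : List Int) :
    (l.zip l.tail).map (fun pq => pq.2 - pq.1) = pvDiffs l := by
  simp [pvDiffs, List.zip, List.map_zipWith]

-- the trial loop from divisor d answers: no divisor e ≥ d with e*e ≤ p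
theorem pvTrial_iff_aux (p : Int) : ∀ (k : Nat) (d : Int), (p + 2 - d).toNat = k → 2 ≤ d →
    (pvTrial p d = true ↔ ∀ e : Int, d ≤ e → e * e ≤ p → ¬ e ∣ p) := by
  intro k
  induction k using Nat.strong_induction_on with
  | _ k ih =>
    intro d hk hd
    rw [pvTrial]
    by_cases h : d * d ≤ p
    · rw [dif_pos h]
      by_cases hmod : PySem.Int.mod p d = 0
      · rw [if_pos hmod]
        refine iff_of_false (by simp) ?_
        push Not
        rw [PySem.Int.mod_eq_zero_iff_dvd] at hmod
        exact ⟨d, le_rfl, h, hmod⟩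
      · rw [if_neg hmod]
        have hdec : (p + 2 - (d + 1)).toNat < k := by
          have h1 : d ≤ d * d := by nlinarith
          omega
        rw [ih _ hdec (d + 1) rfl (by omega)]
        constructor
        · intro hall e hde hesq hed
          rcases eq_or_lt_of_le hde with he | he
          · apply hmod
            rw [PySem.Int.mod_eq_zero_iff_dvd, he]
            exact hed
          · exact hall e (by omega) hesq hed
        · intro hall e hde hesq hed
          exact hall e (by omega) hesq hed
    · rw [dif_neg h]
      refine iff_of_true rfl ?_
      intro e hde hesq _
      apply h
      have : d * d ≤ e * e := by nlinarith
      omega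

theorem pvTrial_iff (p d : Int) (hd : 2 ≤ d) :
    pvTrial p d = true ↔ ∀ e : Int, d ≤ e → e * e ≤ p → ¬ e ∣ p :=
  pvTrial_iff_aux p _ d rfl hd

-- pvIsPrimeB tests primality
theorem pvIsPrimeB_iff (m : Int) (hm : 2 ≤ m) : pvIsPrimeB m = true ↔ Nat.Prime m.toNat := by
  rw [pvIsPrimeB, pvTrial_iff m 2 le_rfl]
  constructor
  · intro h
    by_contra hnp
    have hq'p : (m.toNat.minFac).Prime := Nat.minFac_prime (by omega)
    have hdvd : m.toNat.minFac ∣ m.toNat := Nat.minFac_dvd _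
    have hsq : m.toNat.minFac * m.toNat.minFac ≤ m.toNat := by
      have h2 := Nat.minFac_sq_le_self (n := m.toNat) (by omega) hnp
      nlinarith [h2]
    refine h (m.toNat.minFac : Int) (by exact_mod_cast hq'p.two_le) ?_ ?_
    · have h3 : ((m.toNat.minFac * m.toNat.minFac : Nat) : Int) ≤ ((m.toNat : Int)) := by
        exact_mod_cast hsq
      push_cast at h3
      omega
    · have h4 : ((m.toNat.minFac : Int)) ∣ ((m.toNat : Int)) := Int.natCast_dvd_natCast.mpr hdvd
      rwa [Int.toNat_of_nonneg (by omega)] at h4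
  · intro hp e he2 hesq hed
    have h0' : ((e.toNat : Int)) ∣ ((m.toNat : Int)) := by
      rwa [Int.toNat_of_nonneg (by omega), Int.toNat_of_nonneg (by omega)]
    rcases hp.eq_one_or_self_of_dvd e.toNat (Int.natCast_dvd_natCast.mp h0') with h1 | h1
    · omega
    · have heq : e = m := by omega
      rw [heq] at hesq
      nlinarith

-- key sieve fact: m survives all markings by smaller primes iff it passes trial division
theorem pv_key (m : Int) (hm : 2 ≤ m) :
    pvIsPrimeB m = true ↔
      ¬ ∃ q : Int, 2 ≤ q ∧ q < m ∧ pvIsPrimeB q = true ∧ q * q ≤ m ∧ q ∣ m := by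
  constructor
  · intro hp
    rintro ⟨q, hq2, hqm, hqp, hqsq, hqd⟩
    have hprime := (pvIsPrimeB_iff m hm).mp hp
    have h0' : ((q.toNat : Int)) ∣ ((m.toNat : Int)) := by
      rwa [Int.toNat_of_nonneg (by omega), Int.toNat_of_nonneg (by omega)]
    have := hprime.eq_one_or_self_of_dvd q.toNat (Int.natCast_dvd_natCast.mp h0')
    omega
  · intro h
    by_contra hnp
    have hnprime : ¬ Nat.Prime m.toNat := fun hpr => hnp ((pvIsPrimeB_iff m hm).mpr hpr)
    apply h
    set q' := m.toNat.minFac with hq'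
    have hq'p : q'.Prime := Nat.minFac_prime (by omega)
    have hdvd : q' ∣ m.toNat := Nat.minFac_dvd _
    have hsq : q' * q' ≤ m.toNat := by
      have := Nat.minFac_sq_le_self (n := m.toNat) (by omega) hnprime
      nlinarith [this, sq_nonneg q']
    have hq'le : q' ≤ m.toNat := Nat.le_of_dvd (by omega) hdvd
    have hq'ne : q' ≠ m.toNat := by
      intro he
      exact hnprime (he ▸ hq'p)
    refine ⟨(q' : Int), by exact_mod_cast hq'p.two_le, by omega, ?_, ?_, ?_⟩
    · rw [pvIsPrimeB_iff _ (by exact_mod_cast hq'p.two_le)]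
      simpa using hq'p
    · have : ((q' * q' : Nat) : Int) ≤ ((m.toNat : Int)) := by exact_mod_cast hsq
      push_cast at this
      omega
    · have : ((q' : Int)) ∣ ((m.toNat : Int)) := Int.natCast_dvd_natCast.mpr hdvd
      rwa [Int.toNat_of_nonneg (by omega)] at this

-- the inner marking loop: sets exactly the listed (nonnegative) indices to false
theorem pv_markfold_getD (L : List Int) (S : List Bool) (j : Nat)
    (h : ∀ i ∈ L, 0 ≤ i) :
    (L.foldl (fun a i => PySem.List.pySetD a i false) S).getD j false
      = (if (j : Int) ∈ L then false else S.getD j false) := by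
  induction L generalizing S with
  | nil => simp
  | cons i L ih =>
    simp only [List.foldl_cons]
    rw [ih _ (fun x hx => h x (List.mem_cons_of_mem _ hx)),
        PySem.List.pySetD_of_nonneg _ _ (h i List.mem_cons_self)]
    by_cases hji : (j : Int) = i
    · have hjt : j = i.toNat := by omega
      simp only [List.mem_cons, hji, true_or, if_pos]
      by_cases hin : i ∈ L
      · rw [if_pos hin]
      · rw [if_neg hin, hjt]
        by_cases hlt : i.toNat < S.length
        · rw [List.getD_eq_getElem?_getD, List.getElem?_set_self hlt]
          rfl
        · rw [List.getD_eq_getElem?_getD, List.getElem?_eq_none (by simpa using hlt)]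
          rfl
    · have hne : i.toNat ≠ j := by
        intro he
        apply hji
        have := h i List.mem_cons_self
        omega
      rw [List.getD_eq_getElem?_getD, List.getElem?_set_ne hne, ← List.getD_eq_getElem?_getD]
      by_cases hin : (j : Int) ∈ L
      · simp [hin]
      · have : ¬ (j : Int) ∈ i :: L := by simp [hji, hin]
        rw [if_neg hin, if_neg this]

theorem pv_markfold_length (L : List Int) (S : List Bool) :
    (L.foldl (fun a i => PySem.List.pySetD a i false) S).length = S.length := by
  induction L generalizing S with
  | nil => rfl
  | cons i L ih => simp [List.foldl_cons, ih, PySem.List.length_pySetD]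

-- j is crossed out after the sieve has processed candidates below m
def pvMarked (m : Int) (j : Nat) : Prop :=
  ∃ q : Int, 2 ≤ q ∧ q < m ∧ pvIsPrimeB q = true ∧ q * q ≤ (j : Int) ∧ q ∣ (j : Int)

-- the sieve-loop invariant
theorem pv_sieve_inv (n : Int) (k : Nat) (hk : 2 + (k : Int) ≤ n + 1) :
    (((PySem.List.pyRange 2 (2 + (k : Int)) 1).foldl (pvStepA n)
        ([], List.replicate (n + 1).toNat true)).1
      = (PySem.List.pyRange 2 (2 + (k : Int)) 1).filter pvIsPrimeB)
    ∧ (((PySem.List.pyRange 2 (2 + (k : Int)) 1).foldl (pvStepA n)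
        ([], List.replicate (n + 1).toNat true)).2.length = (n + 1).toNat)
    ∧ (∀ j : Nat, j < (n + 1).toNat →
        ((((PySem.List.pyRange 2 (2 + (k : Int)) 1).foldl (pvStepA n)
            ([], List.replicate (n + 1).toNat true)).2.getD j false) = true
          ↔ ¬ pvMarked (2 + (k : Int)) j)) := by
  induction k with
  | zero =>
    rw [show ((0:Nat):Int) = 0 by rfl]
    rw [PySem.List.pyRange_one_eq_nil (by omega)]
    refine ⟨rfl, by simp, ?_⟩
    intro j hj
    simp only [List.foldl_nil]
    rw [List.getD_replicate true hj]
    simp only [true_iff]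
    rintro ⟨q, hq2, hqm, _, _, _⟩
    omega
  | succ k ih =>
    have hm2 : (2:Int) ≤ 2 + (k : Int) := by omega
    have hcast : 2 + ((k + 1 : Nat) : Int) = (2 + (k : Int)) + 1 := by push_cast; ring
    rw [hcast, PySem.List.pyRange_one_succ_right hm2, List.foldl_append, List.filter_append]
    set m : Int := 2 + (k : Int) with hmdef
    obtain ⟨hP, hL, hS⟩ := ih (by omega)
    set st := ((PySem.List.pyRange 2 m 1).foldl (pvStepA n)
        ([], List.replicate (n + 1).toNat true)) with hst
    have hmn : m ≤ n := by omega
    have hmtoNat : ((m.toNat : Nat) : Int) = m := Int.toNat_of_nonneg (by omega)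
    have hmlt : m.toNat < (n + 1).toNat := by omega
    -- the tested bit equals the trial-division test
    have hbit : PySem.List.pyGetD st.2 m false = pvIsPrimeB m := by
      conv_lhs => rw [← hmtoNat]
      rw [PySem.List.pyGetD_natCast]
      have h1 := hS m.toNat hmlt
      have h2 : pvIsPrimeB m = true ↔ ¬ pvMarked m m.toNat := by
        rw [pv_key m hm2]
        unfold pvMarked
        rw [hmtoNat]
      rw [← h2] at h1
      cases hb : st.2.getD m.toNat false
      · cases hp : pvIsPrimeB m
        · rfl
        · rw [hb, hp] at h1; simp at h1
      · cases hp : pvIsPrimeB m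
        · rw [hb, hp] at h1; simp at h1
        · rfl
    simp only [List.foldl_cons, List.foldl_nil]
    by_cases hpm : pvIsPrimeB m = true
    · -- m is prime: appended to primes, its multiples ≥ m*m are marked
      have hstep : pvStepA n st m =
          (st.1 ++ [m],
           (PySem.List.pyRange (m * m) (n + 1) m).foldl
             (fun a i => PySem.List.pySetD a i false) st.2) := by
        rw [pvStepA, hbit, hpm]
        simp
      rw [hstep]
      have hnonneg : ∀ i ∈ PySem.List.pyRange (m * m) (n + 1) m, (0:Int) ≤ i := by
        intro i hi
        have := (PySem.List.mem_pyRange_iff_of_pos (by omega) i).mp hi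
        nlinarith [this.1]
      refine ⟨?_, ?_, ?_⟩
      · rw [hP]
        simp [hpm]
      · rw [pv_markfold_length, hL]
      · intro j hj
        rw [pv_markfold_getD _ _ _ hnonneg]
        have hjn : (j : Int) < n + 1 := by omega
        by_cases hin : (j : Int) ∈ PySem.List.pyRange (m * m) (n + 1) m
        · rw [if_pos hin]
          obtain ⟨ha, hb', hc⟩ := (PySem.List.mem_pyRange_iff_of_pos (by omega) _).mp hin
          have hdj : m ∣ (j : Int) := by
            have h2 := dvd_add hc (dvd_mul_left m m)
            simpa using h2
          exact iff_of_false (by simp) (not_not.mpr ⟨m, hm2, by omega, hpm, ha, hdj⟩)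
        · rw [if_neg hin, hS j hj]
          constructor
          · intro hnm hmk
            apply hnm
            obtain ⟨q, hq2, hqm1, hqp, hqsq, hqd⟩ := hmk
            refine ⟨q, hq2, ?_, hqp, hqsq, hqd⟩
            rcases lt_or_eq_of_le (by omega : q ≤ m) with h | h
            · exact h
            · exfalso
              apply hin
              subst h
              rw [PySem.List.mem_pyRange_iff_of_pos (by omega)]
              refine ⟨hqsq, hjn, ?_⟩
              exact dvd_sub hqd (dvd_mul_left _ _)
          · intro hnm hmk
            obtain ⟨q, hq2, hqm1, hqp, hqsq, hqd⟩ := hmk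
            exact hnm ⟨q, hq2, by omega, hqp, hqsq, hqd⟩
    · -- m is composite: state unchanged
      have hstep : pvStepA n st m = st := by
        rw [pvStepA, hbit]
        simp [hpm]
      rw [hstep]
      refine ⟨?_, hL, ?_⟩
      · rw [hP]
        simp [hpm]
      · intro j hj
        rw [hS j hj]
        constructor
        · intro hnm hmk
          apply hnm
          obtain ⟨q, hq2, hqm1, hqp, hqsq, hqd⟩ := hmk
          refine ⟨q, hq2, ?_, hqp, hqsq, hqd⟩
          rcases lt_or_eq_of_le (by omega : q ≤ m) with h | h
          · exact h
          · exact absurd (h ▸ hqp) hpm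
        · intro hnm hmk
          obtain ⟨q, hq2, hqm1, hqp, hqsq, hqd⟩ := hmk
          exact hnm ⟨q, hq2, by omega, hqp, hqsq, hqd⟩

-- the sieve's primes list is the trial-division filter
theorem pv_primes_eq (n : Int) :
    ((PySem.List.pyRange 2 (n + 1) 1).foldl (pvStepA n)
        ([], List.replicate (n + 1).toNat true)).1
      = (PySem.List.pyRange 2 (n + 1) 1).filter pvIsPrimeB := by
  by_cases hn : n + 1 ≤ 2
  · rw [PySem.List.pyRange_one_eq_nil hn]
    rfl
  · have hk : n + 1 = 2 + ((n - 1).toNat : Int) := by omega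
    have h := (pv_sieve_inv n (n - 1).toNat (by omega)).1
    rw [← hk] at h
    exact h

-- ===== VERDICT (by name: the statement is the Claim_ definition above) =====
theorem generate_prime_gaps_spec : Claim_equal_generate_prime_gaps := by
  intro limit _
  unfold Spec_generate_prime_gaps generate_prime_gaps generate_prime_gaps_alt
  simp only [pv_primes_eq, PySem.List.slice_from_one, pv_comprehension_eq_diffs, pv_zip_eq_diffs]
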